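-- pv_equiv track=rewrite | github.com/abaskk/Word-Searcher | modules/ml_pipeline.py | vertex_coords
-- ===== SOURCE A (Python) =====
-- def vertex_coords(polygon):
--     br_candidates = [coord[0][0]+coord[0][1] for coord in polygon]
--     br = max(range(len(br_candidates)),key = br_candidates.__getitem__)
--
--     bl_candidates = [coord[0][0]-coord[0][1] for coord in polygon]
--     bl = min(range(len(bl_candidates)),key = bl_candidates.__getitem__)
--
--     tr_candidates = [coord[0][0]-coord[0][1] for coord in polygon]
--     tr = max(range(len(tr_candidates)),key = tr_candidates.__getitem__)
--
--     tl_candidates = [coord[0][0]+coord[0][1] for coord in polygon]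
--     tl = min(range(len(tl_candidates)),key = tl_candidates.__getitem__)
--
--
--     return (tl,tr,bl,br)
-- ===== SOURCE B (Python) =====
-- def vertex_coords(polygon):
--     c0 = polygon[0]
--     s0 = c0[0][0] + c0[0][1]
--     d0 = c0[0][0] - c0[0][1]
--     tl = tr = bl = br = 0
--     maxs = mins = s0
--     maxd = mind = d0
--     i = 1
--     for coord in polygon[1:]:
--         x, y = coord[0][0], coord[0][1]
--         s, d = x + y, x - y
--         if s > maxs:
--             maxs, br = s, i
--         if s < mins:
--             mins, tl = s, i
--         if d > maxd:
--             maxd, tr = d, i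
--         if d < mind:
--             mind, bl = d, i
--         i += 1
--     return (tl, tr, bl, br)
-- ===== Notes on version B (the rewrite author's own statement) =====
-- stated objective: alternative
-- what changed: Replaces the four intermediate candidate lists and four separate max/min-over-range argmax scans by a single fused pass that tracks all four running extrema and their first indices in one loop.
import Mathlib
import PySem

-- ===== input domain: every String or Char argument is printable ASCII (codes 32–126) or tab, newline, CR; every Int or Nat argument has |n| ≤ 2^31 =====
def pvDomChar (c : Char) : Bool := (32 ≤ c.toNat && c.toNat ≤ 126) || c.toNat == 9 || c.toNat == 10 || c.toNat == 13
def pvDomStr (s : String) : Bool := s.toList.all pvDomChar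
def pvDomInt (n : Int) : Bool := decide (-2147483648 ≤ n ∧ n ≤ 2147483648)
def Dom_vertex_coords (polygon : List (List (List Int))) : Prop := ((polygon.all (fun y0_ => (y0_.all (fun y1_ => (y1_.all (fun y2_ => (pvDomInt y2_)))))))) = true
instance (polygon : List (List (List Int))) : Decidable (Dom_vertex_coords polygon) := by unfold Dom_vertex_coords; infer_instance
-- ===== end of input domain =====

-- B fuses A's four candidate-list builds and four argmax/argmin scans into one pass; objective: alternative (single-pass decomposition), not measured faster.

-- ===== PORT A =====
-- coord[0][0] / coord[0][1]; Pre_ guarantees these indices exist, so pyGetD matches Python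
def pvX (c : List (List Int)) : Int := PySem.List.pyGetD (PySem.List.pyGetD c 0 []) 0 0
def pvY (c : List (List Int)) : Int := PySem.List.pyGetD (PySem.List.pyGetD c 0 []) 1 0

-- max(range(len(xs)), key=xs.__getitem__): left-to-right scan, strict '>' keeps the first maximum
def goMaxIdx : List Int → Int → Int → Int → Int
  | [], _, bi, _ => bi
  | v :: t, bv, bi, i => if v > bv then goMaxIdx t v i (i+1) else goMaxIdx t bv bi (i+1)

def goMinIdx : List Int → Int → Int → Int → Int
  | [], _, bi, _ => bi
  | v :: t, bv, bi, i => if v < bv then goMinIdx t v i (i+1) else goMinIdx t bv bi (i+1)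

-- Python raises ValueError on the empty list; Pre_ excludes it, 0 is a dummy
def argmaxIdx : List Int → Int
  | [] => 0
  | x :: t => goMaxIdx t x 0 1

def argminIdx : List Int → Int
  | [] => 0
  | x :: t => goMinIdx t x 0 1

def vertex_coords (polygon : List (List (List Int))) : Int × Int × Int × Int :=
  let br_candidates := polygon.map (fun c => pvX c + pvY c)
  let br := argmaxIdx br_candidates
  let bl_candidates := polygon.map (fun c => pvX c - pvY c)
  let bl := argminIdx bl_candidates
  let tr_candidates := polygon.map (fun c => pvX c - pvY c)
  let tr := argmaxIdx tr_candidates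
  let tl_candidates := polygon.map (fun c => pvX c + pvY c)
  let tl := argminIdx tl_candidates
  (tl, tr, bl, br)

-- ===== PORT B =====
-- single fused pass over polygon[1:], tracking the four running extrema and first indices
def goB : List (List (List Int)) → Int → Int → Int → Int → Int → Int → Int → Int → Int → Int × Int × Int × Int
  | [], _, tl, tr, bl, br, _, _, _, _ => (tl, tr, bl, br)
  | c :: t, i, tl, tr, bl, br, maxs, mins, maxd, mind =>
    let x := pvX c
    let y := pvY c
    let s := x + y
    let d := x - y
    let p1 := if s > maxs then (s, i) else (maxs, br)
    let p2 := if s < mins then (s, i) else (mins, tl)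
    let p3 := if d > maxd then (d, i) else (maxd, tr)
    let p4 := if d < mind then (d, i) else (mind, bl)
    goB t (i+1) p2.2 p3.2 p4.2 p1.2 p1.1 p2.1 p3.1 p4.1

def vertex_coords_alt (polygon : List (List (List Int))) : Int × Int × Int × Int :=
  match polygon with
  | [] => (0, 0, 0, 0)  -- Source B raises IndexError here; excluded by Pre_
  | c0 :: rest =>
    let s0 := pvX c0 + pvY c0
    let d0 := pvX c0 - pvY c0
    goB rest 1 0 0 0 0 s0 s0 d0 d0

-- ===== PRECONDITION & SPEC =====
-- Pre_ excludes exactly the inputs where Python A raises: the empty polygon (max/min of empty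
-- range, ValueError) and polygons containing a coord where coord[0] or coord[0][1] is out of range (IndexError).
def Pre_vertex_coords (polygon : List (List (List Int))) : Prop :=
  polygon ≠ [] ∧ ∀ c ∈ polygon, c ≠ [] ∧ 2 ≤ (c.headD []).length

instance (polygon : List (List (List Int))) : Decidable (Pre_vertex_coords polygon) := by
  unfold Pre_vertex_coords; infer_instance

def pvWitness_vertex_coords : List (List (List Int)) := [[[0, 0]], [[1, 2]], [[3, -1]]]

def Spec_vertex_coords (polygon : List (List (List Int))) (out : Int × Int × Int × Int) : Prop := out = vertex_coords_alt polygon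
instance (polygon : List (List (List Int))) (out : Int × Int × Int × Int) : Decidable (Spec_vertex_coords polygon out) := by unfold Spec_vertex_coords; infer_instance

-- ===== CLAIM (what is proved, stated in full; the proofs are below) =====
def Claim_equal_vertex_coords : Prop := ∀ (polygon : List (List (List Int))), Dom_vertex_coords polygon → Pre_vertex_coords polygon → Spec_vertex_coords polygon (vertex_coords polygon)

-- ===== LEMMAS AND PROOFS =====
theorem goB_eq (rest : List (List (List Int))) : ∀ (i tl tr bl br maxs mins maxd mind : Int),
    goB rest i tl tr bl br maxs mins maxd mind =
      (goMinIdx (rest.map (fun c => pvX c + pvY c)) mins tl i,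
       goMaxIdx (rest.map (fun c => pvX c - pvY c)) maxd tr i,
       goMinIdx (rest.map (fun c => pvX c - pvY c)) mind bl i,
       goMaxIdx (rest.map (fun c => pvX c + pvY c)) maxs br i) := by
  induction rest with
  | nil => intro i tl tr bl br maxs mins maxd mind; simp [goB, goMinIdx, goMaxIdx]
  | cons c t ih =>
    intro i tl tr bl br maxs mins maxd mind
    simp only [goB, List.map_cons, goMinIdx, goMaxIdx]
    split_ifs <;> simp [ih]

theorem vertex_coords_spec : Claim_equal_vertex_coords := by
  intro polygon _ _
  unfold Spec_vertex_coords
  cases polygon with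
  | nil => rfl
  | cons c0 rest =>
    simp only [vertex_coords, vertex_coords_alt, List.map_cons, argmaxIdx, argminIdx, goB_eq]
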